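-- pv_equiv track=rewrite | github.com/Mirco76BX/openrisk-backend | main.py | _rating_equivalenz
-- ===== SOURCE A (Python) =====
-- def _rating_equivalenz(bi: int) -> list:
--     """v2.10.23: Ratingäquivalenz-Tabelle für einen gegebenen Bonitätsindex (100-600).
--     Mappt auf gängige Bankratings und Agenturen-Skalen.
--     Quellen: Commerzbank KMU-Rating, Sparkassen-Rating, S&P/Moody's/Fitch KMU-Mapping."""
--     table = [
--         # (bi_von, bi_bis, openrisk, sp,      moodys,  fitch,  commerzbank,  sparkasse,  bundesbank)
--         (100, 149, "A",  "AAA–AA", "Aaa–Aa", "AAA–AA", "1",   "1–2",   "sehr gut"),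
--         (150, 199, "B",  "A",      "A",       "A",      "2",   "3–4",   "gut"),
--         (200, 249, "C",  "BBB",    "Baa",     "BBB",    "3",   "5–6",   "befriedigend"),
--         (250, 299, "D",  "BB+",    "Ba1",     "BB+",    "4",   "7–8",   "ausreichend"),
--         (300, 349, "E",  "BB–B+",  "Ba2–Ba3", "BB–B+",  "4–5", "9–10",  "erhöhtes Risiko"),
--         (350, 449, "F",  "B",      "B",       "B",      "5–6", "11–12", "kritisch"),
--         (450, 549, "G",  "CCC",    "Caa",     "CCC",    "6",   "13–14", "sehr kritisch"),
--         (550, 600, "H",  "CC–D",   "Ca–C",    "CC–D",   "6",   "15–16", "höchstes Risiko"),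
--     ]
--     for lo, hi, or_g, sp, mo, fi, cb, spk, bb in table:
--         if lo <= bi <= hi:
--             return [
--                 {"skala": "OpenRisk", "rating": or_g, "beschreibung": f"Score {bi}/600"},
--                 {"skala": "S&P (äquivalent)", "rating": sp, "beschreibung": ""},
--                 {"skala": "Moody's (äquivalent)", "rating": mo, "beschreibung": ""},
--                 {"skala": "Fitch (äquivalent)", "rating": fi, "beschreibung": ""},
--                 {"skala": "Commerzbank KMU", "rating": cb, "beschreibung": "Risikoklasse"},
--                 {"skala": "Sparkassen-Rating", "rating": spk, "beschreibung": "Ratingklasse"},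
--                 {"skala": "Bundesbank-Kategorie", "rating": bb, "beschreibung": ""},
--             ]
--     return []
-- ===== SOURCE B (Python) =====
-- _META = [
--     ("OpenRisk", None),
--     ("S&P (\u00e4quivalent)", ""),
--     ("Moody's (\u00e4quivalent)", ""),
--     ("Fitch (\u00e4quivalent)", ""),
--     ("Commerzbank KMU", "Risikoklasse"),
--     ("Sparkassen-Rating", "Ratingklasse"),
--     ("Bundesbank-Kategorie", ""),
-- ]
--
-- _ROWS = [
--     ["A", "AAA\u2013AA", "Aaa\u2013Aa", "AAA\u2013AA", "1",   "1\u20132",   "sehr gut"],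
--     ["B", "A",      "A",       "A",      "2",   "3\u20134",   "gut"],
--     ["C", "BBB",    "Baa",     "BBB",    "3",   "5\u20136",   "befriedigend"],
--     ["D", "BB+",    "Ba1",     "BB+",    "4",   "7\u20138",   "ausreichend"],
--     ["E", "BB\u2013B+",  "Ba2\u2013Ba3", "BB\u2013B+",  "4\u20135", "9\u201310",  "erh\u00f6htes Risiko"],
--     ["F", "B",      "B",       "B",      "5\u20136", "11\u201312", "kritisch"],
--     ["G", "CCC",    "Caa",     "CCC",    "6",   "13\u201314", "sehr kritisch"],
--     ["H", "CC\u2013D",   "Ca\u2013C",    "CC\u2013D",   "6",   "15\u201316", "h\u00f6chstes Risiko"],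
-- ]
--
--
-- def _rating_equivalenz(bi: int) -> list:
--     """Closed-form arithmetic band index (no scan), output zipped from a metadata table."""
--     if bi < 100 or bi > 600:
--         return []
--     idx = (bi - 100) // 50 if bi < 350 else 5 + (bi - 350) // 100
--     return [
--         {"skala": s, "rating": r,
--          "beschreibung": f"Score {bi}/600" if d is None else d}
--         for (s, d), r in zip(_META, _ROWS[idx])
--     ]
-- ===== Notes on version B (the rewrite author's own statement) =====
-- stated objective: alternative
-- what changed: Replaces A's linear scan over (lo,hi)-range tuples with inline dict literals by a closed-form arithmetic band index (integer division on the score) into a row table, and builds the seven dicts by zipping a (skala, beschreibung) metadata list with the selected row instead of writing them out.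
import Mathlib
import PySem

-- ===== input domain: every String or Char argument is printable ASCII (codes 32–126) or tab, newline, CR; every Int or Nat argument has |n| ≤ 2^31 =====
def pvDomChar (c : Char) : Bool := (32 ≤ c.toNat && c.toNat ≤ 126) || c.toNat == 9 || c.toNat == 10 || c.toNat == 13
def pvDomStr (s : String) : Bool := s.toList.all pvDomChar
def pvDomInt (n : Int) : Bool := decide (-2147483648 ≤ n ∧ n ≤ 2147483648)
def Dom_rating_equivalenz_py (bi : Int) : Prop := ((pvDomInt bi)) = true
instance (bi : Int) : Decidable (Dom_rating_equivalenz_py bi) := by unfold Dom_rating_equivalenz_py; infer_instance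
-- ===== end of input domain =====

-- B replaces A's linear scan over (lo,hi)-range tuples (inline dict literals) by a
-- closed-form arithmetic band index into a row table, the output zipped from a metadata list.

-- ===== PORT A =====
-- the `table` literal of A, as (lo, hi, openrisk, sp, moodys, fitch, commerzbank, sparkasse, bundesbank)
def ratingTableA : List (Int × Int × String × String × String × String × String × String × String) :=
  [ (100, 149, "A",  "AAA–AA", "Aaa–Aa",  "AAA–AA", "1",   "1–2",   "sehr gut"),
    (150, 199, "B",  "A",      "A",       "A",      "2",   "3–4",   "gut"),
    (200, 249, "C",  "BBB",    "Baa",     "BBB",    "3",   "5–6",   "befriedigend"),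
    (250, 299, "D",  "BB+",    "Ba1",     "BB+",    "4",   "7–8",   "ausreichend"),
    (300, 349, "E",  "BB–B+",  "Ba2–Ba3", "BB–B+",  "4–5", "9–10",  "erhöhtes Risiko"),
    (350, 449, "F",  "B",      "B",       "B",      "5–6", "11–12", "kritisch"),
    (450, 549, "G",  "CCC",    "Caa",     "CCC",    "6",   "13–14", "sehr kritisch"),
    (550, 600, "H",  "CC–D",   "Ca–C",    "CC–D",   "6",   "15–16", "höchstes Risiko") ]

-- A's `for … in table: if lo <= bi <= hi: return […]` loop, with the dicts built inline
def ratingFindA (bi : Int) : List (Int × Int × String × String × String × String × String × String × String) → List (List (String × String))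
  | [] => []
  | (lo, hi, or_g, sp, mo, fi, cb, spk, bb) :: rest =>
    if lo ≤ bi ∧ bi ≤ hi then
      [ [("skala", "OpenRisk"), ("rating", or_g), ("beschreibung", "Score " ++ PySem.Int.toStr bi ++ "/600")],
        [("skala", "S&P (äquivalent)"), ("rating", sp), ("beschreibung", "")],
        [("skala", "Moody's (äquivalent)"), ("rating", mo), ("beschreibung", "")],
        [("skala", "Fitch (äquivalent)"), ("rating", fi), ("beschreibung", "")],
        [("skala", "Commerzbank KMU"), ("rating", cb), ("beschreibung", "Risikoklasse")],
        [("skala", "Sparkassen-Rating"), ("rating", spk), ("beschreibung", "Ratingklasse")],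
        [("skala", "Bundesbank-Kategorie"), ("rating", bb), ("beschreibung", "")] ]
    else ratingFindA bi rest

def rating_equivalenz_py (bi : Int) : List (List (String × String)) :=
  ratingFindA bi ratingTableA

-- ===== PORT B =====
-- _META of Source B: (skala, fixed beschreibung; none = the dynamic "Score {bi}/600")
def ratingMeta : List (String × Option String) :=
  [ ("OpenRisk", none),
    ("S&P (äquivalent)", some ""),
    ("Moody's (äquivalent)", some ""),
    ("Fitch (äquivalent)", some ""),
    ("Commerzbank KMU", some "Risikoklasse"),
    ("Sparkassen-Rating", some "Ratingklasse"),
    ("Bundesbank-Kategorie", some "") ]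

-- _ROWS of Source B: the seven rating strings per band
def ratingRows : List (List String) :=
  [ ["A", "AAA–AA", "Aaa–Aa",  "AAA–AA", "1",   "1–2",   "sehr gut"],
    ["B", "A",      "A",       "A",      "2",   "3–4",   "gut"],
    ["C", "BBB",    "Baa",     "BBB",    "3",   "5–6",   "befriedigend"],
    ["D", "BB+",    "Ba1",     "BB+",    "4",   "7–8",   "ausreichend"],
    ["E", "BB–B+",  "Ba2–Ba3", "BB–B+",  "4–5", "9–10",  "erhöhtes Risiko"],
    ["F", "B",      "B",       "B",      "5–6", "11–12", "kritisch"],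
    ["G", "CCC",    "Caa",     "CCC",    "6",   "13–14", "sehr kritisch"],
    ["H", "CC–D",   "Ca–C",    "CC–D",   "6",   "15–16", "höchstes Risiko"] ]

def rating_equivalenz_py_alt (bi : Int) : List (List (String × String)) :=
  if bi < 100 ∨ bi > 600 then []
  else
    List.zipWith
      (fun (m : String × Option String) (r : String) =>
        [("skala", m.1), ("rating", r),
         ("beschreibung",
           match m.2 with
           | none => "Score " ++ PySem.Int.toStr bi ++ "/600"
           | some d => d)])
      ratingMeta
      ((PySem.List.pyGet? ratingRows
          (if bi < 350 then PySem.Int.floordiv (bi - 100) 50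
           else 5 + PySem.Int.floordiv (bi - 350) 100)).getD [])

-- ===== PRECONDITION & SPEC =====
def Spec_rating_equivalenz_py (bi : Int) (out : List (List (String × String))) : Prop := out = rating_equivalenz_py_alt bi
instance (bi : Int) (out : List (List (String × String))) : Decidable (Spec_rating_equivalenz_py bi out) := by unfold Spec_rating_equivalenz_py; infer_instance

-- ===== CLAIM (what is proved, stated in full; the proofs are below) =====
def Claim_equal_rating_equivalenz_py : Prop := ∀ (bi : Int), Dom_rating_equivalenz_py bi → Spec_rating_equivalenz_py bi (rating_equivalenz_py bi)

-- ===== LEMMAS AND PROOFS =====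

-- within one band, pin the arithmetic index to its literal value
theorem ratingIdx_eq (bi k : Int) (h100 : 100 ≤ bi) (h600 : bi ≤ 600)
    (hk : (bi < 350 → 50 * k ≤ bi - 100 ∧ bi - 100 < 50 * (k + 1)) ∧
          (350 ≤ bi → 100 * (k - 5) ≤ bi - 350 ∧ bi - 350 < 100 * (k - 4))) :
    (if bi < 350 then PySem.Int.floordiv (bi - 100) 50
     else 5 + PySem.Int.floordiv (bi - 350) 100) = k := by
  split_ifs with h
  · have := hk.1 h
    rw [PySem.Int.floordiv_eq_iff_of_pos (by omega)]
    omega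
  · have := hk.2 (by omega)
    have : PySem.Int.floordiv (bi - 350) 100 = k - 5 := by
      rw [PySem.Int.floordiv_eq_iff_of_pos (by omega)]
      omega
    omega

set_option maxHeartbeats 1000000 in
-- VERDICT (by name: the statement is the Claim_ definition above)
theorem rating_equivalenz_py_spec : Claim_equal_rating_equivalenz_py := by
  intro bi _
  unfold Spec_rating_equivalenz_py rating_equivalenz_py rating_equivalenz_py_alt
  by_cases hout : bi < 100 ∨ bi > 600
  · rw [if_pos hout]
    simp only [ratingTableA, ratingFindA]
    split_ifs <;> first | rfl | omega
  · rw [if_neg hout]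
    rw [not_or, not_lt, not_lt] at hout
    obtain ⟨h100, h600⟩ := hout
    by_cases hb0 : bi ≤ 149
    · rw [ratingIdx_eq bi 0 h100 h600 (by constructor <;> intro <;> omega)]
      simp only [ratingRows, ratingMeta, ratingTableA]
      simp [PySem.List.pyGet?, PySem.List.pyIdx?, ratingFindA, List.zipWith]
      split_ifs <;> first | rfl | omega
    · by_cases hb1 : bi ≤ 199
      · rw [ratingIdx_eq bi 1 h100 h600 (by constructor <;> intro <;> omega)]
        simp only [ratingRows, ratingMeta, ratingTableA]
        simp [PySem.List.pyGet?, PySem.List.pyIdx?, ratingFindA, List.zipWith]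
        split_ifs <;> first | rfl | omega
      · by_cases hb2 : bi ≤ 249
        · rw [ratingIdx_eq bi 2 h100 h600 (by constructor <;> intro <;> omega)]
          simp only [ratingRows, ratingMeta, ratingTableA]
          simp [PySem.List.pyGet?, PySem.List.pyIdx?, ratingFindA, List.zipWith]
          split_ifs <;> first | rfl | omega
        · by_cases hb3 : bi ≤ 299
          · rw [ratingIdx_eq bi 3 h100 h600 (by constructor <;> intro <;> omega)]
            simp only [ratingRows, ratingMeta, ratingTableA]
            simp [PySem.List.pyGet?, PySem.List.pyIdx?, ratingFindA, List.zipWith]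
            split_ifs <;> first | rfl | omega
          · by_cases hb4 : bi ≤ 349
            · rw [ratingIdx_eq bi 4 h100 h600 (by constructor <;> intro <;> omega)]
              simp only [ratingRows, ratingMeta, ratingTableA]
              simp [PySem.List.pyGet?, PySem.List.pyIdx?, ratingFindA, List.zipWith]
              split_ifs <;> first | rfl | omega
            · by_cases hb5 : bi ≤ 449
              · rw [ratingIdx_eq bi 5 h100 h600 (by constructor <;> intro <;> omega)]
                simp only [ratingRows, ratingMeta, ratingTableA]
                simp [PySem.List.pyGet?, PySem.List.pyIdx?, ratingFindA, List.zipWith]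
                split_ifs <;> first | rfl | omega
              · by_cases hb6 : bi ≤ 549
                · rw [ratingIdx_eq bi 6 h100 h600 (by constructor <;> intro <;> omega)]
                  simp only [ratingRows, ratingMeta, ratingTableA]
                  simp [PySem.List.pyGet?, PySem.List.pyIdx?, ratingFindA, List.zipWith]
                  split_ifs <;> first | rfl | omega
                · rw [ratingIdx_eq bi 7 h100 h600 (by constructor <;> intro <;> omega)]
                  simp only [ratingRows, ratingMeta, ratingTableA]
                  simp [PySem.List.pyGet?, PySem.List.pyIdx?, ratingFindA, List.zipWith]
                  split_ifs <;> first | rfl | omega
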